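-- pv_equiv track=rewrite | github.com/rilltan/AdventOfCode | CuCATS2024Solutions/day16/solution.py | fragments
-- ===== SOURCE A (Python) =====
-- def fragments(song):
--     target = song[0]
--     pieces = song[1:]
--     i = 0
--     out = 0
--     while i < len(target):
--         for j in range(max(len(x) for x in pieces),0,-1):
--             possible = [x[-j:] for x in pieces if len(x)>=j]
--             if any(target[i:i+j] == x for x in possible):
--                 out += 1
--                 i += j
--                 break
--     return out
-- ===== SOURCE B (Python) =====
-- def fragments(song):
--     target = song[0]
--     pieces = song[1:]
--     # flattened suffix trie: 'subs' holds every substring of every piece (= every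
--     # node of the trie of all piece suffixes), 'sufs' holds the terminal nodes
--     # (the full suffixes).  At each target position we walk the trie forward,
--     # extending the match one character at a time while it is still a trie node,
--     # and remember the deepest terminal reached; that depth is the greedy step.
--     subs = {x[a:b] for x in pieces for a in range(len(x)) for b in range(a + 1, len(x) + 1)}
--     sufs = {x[a:] for x in pieces for a in range(len(x))}
--     n = len(target)
--     out = 0
--     i = 0
--     while i < n:
--         s = ''
--         best = 0
--         k = i
--         while k < n:
--             s += target[k]
--             if s not in subs:
--                 break
--             k += 1
--             if s in sufs:
--                 best = k - i
--         out += 1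
--         i += best   # best == 0 only when nothing matches; then, like A, loop forever
--     return out
-- ===== Notes on version B (the rewrite author's own statement) =====
-- stated objective: alternative
-- what changed: A scans candidate lengths j downward at every position, rebuilding the list of all length-j piece suffixes for each j and comparing against each; B builds a flattened suffix trie once (the set of all substrings of pieces as trie nodes, the set of all suffixes as terminals) and at each position walks forward character by character, extending the match while it is still a trie node and remembering the deepest terminal reached, which replaces the descending rescan by one early-terminating forward walk.
-- outside the precondition, e.g. on fragments([]): A raises IndexError, B raises IndexError; on fragments(['a']): A raises ValueError, B does not finish within the time limit
import Mathlib
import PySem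

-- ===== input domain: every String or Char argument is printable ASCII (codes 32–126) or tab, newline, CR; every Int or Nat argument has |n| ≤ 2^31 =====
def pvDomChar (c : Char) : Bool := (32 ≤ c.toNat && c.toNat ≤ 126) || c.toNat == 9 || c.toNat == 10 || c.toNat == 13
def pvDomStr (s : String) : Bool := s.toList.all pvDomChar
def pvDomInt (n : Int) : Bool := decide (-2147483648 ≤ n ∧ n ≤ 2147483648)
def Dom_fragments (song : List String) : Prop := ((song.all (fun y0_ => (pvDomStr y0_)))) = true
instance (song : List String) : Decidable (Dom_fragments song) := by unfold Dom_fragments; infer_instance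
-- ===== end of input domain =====

-- B replaces A's per-position descending rescan of all piece-suffix lists by a flattened suffix trie
-- (substring set = trie nodes, suffix set = terminals) walked forward once per position.

-- ===== PORT A =====
-- inner 'for j in range(m,0,-1): possible = [x[-j:] for x in pieces if len(x)>=j]; if any(target[i:i+j]==x for x in possible): break';
-- returns the j the loop broke at (none = the for-loop ran out without a break)
def fragScanA (target : List Char) (pieces : List (List Char)) (i : Int) : Nat → Option Nat
  | 0 => none
  | j+1 =>
    let possible := (pieces.filter (fun x => decide (j+1 ≤ x.length))).map
      (fun x => PySem.List.slice x (some (-((j:Int)+1))) none)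
    if possible.any (fun x => PySem.List.slice target (some i) (some (i + ((j:Int)+1))) == x)
    then some (j+1)
    else fragScanA target pieces i j

-- the 'while i < len(target)' loop; the fuel only totalizes it (inside Pre_ every iteration advances i by ≥ 1)
def fragLoopA (target : List Char) (pieces : List (List Char)) : Nat → Int → Int → Int
  | 0, _, out => out
  | fuel+1, i, out =>
    if i < (target.length : Int) then
      match PySem.List.max? (pieces.map (fun x => (x.length : Int))) (fun v => v) with
      | none => out   -- Python: max() of an empty sequence raises ValueError; outside Pre_
      | some m =>
        match fragScanA target pieces i m.toNat with
        | some j => fragLoopA target pieces fuel (i + (j : Int)) (out + 1)   -- out += 1; i += j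
        | none => out   -- Python: the while loop repeats forever; outside Pre_
    else out

def fragments (song : List String) : Int :=
  match song with
  | [] => 0   -- Python: song[0] raises IndexError; outside Pre_
  | t :: ps => fragLoopA t.toList (ps.map String.toList) (t.toList.length + 1) 0 0

-- ===== PORT B =====
-- {x[a:b] for x in pieces for a in range(len(x)) for b in range(a+1, len(x)+1)}: the trie nodes
def fragSubs (pieces : List (List Char)) : PySem.Set (List Char) :=
  PySem.Set.ofList (pieces.flatMap (fun x =>
    (PySem.List.pyRange 0 (x.length : Int)).flatMap (fun a =>
      (PySem.List.pyRange (a+1) ((x.length : Int) + 1)).map (fun b =>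
        PySem.List.slice x (some a) (some b)))))

-- {x[a:] for x in pieces for a in range(len(x))}: the terminal nodes
def fragSufs (pieces : List (List Char)) : PySem.Set (List Char) :=
  PySem.Set.ofList (pieces.flatMap (fun x =>
    (PySem.List.pyRange 0 (x.length : Int)).map (fun a => PySem.List.slice x (some a) none)))

-- inner "while k < n: s += target[k]; if s not in subs: break; k += 1; if s in sufs: best = k - i";
-- returns the final best; the fuel only totalizes the loop (k strictly increases towards n)
def fragWalkB (target : List Char) (subs sufs : PySem.Set (List Char)) (i : Int) :
    Nat → List Char → Int → Int → Int
  | 0, _, _, best => best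
  | fuel+1, s, k, best =>
    if k < (target.length : Int) then
      match PySem.List.pyGet? target k with
      | none => best   -- unreachable here: 0 ≤ i ≤ k < len target
      | some c =>
        let s' := s ++ [c]
        if PySem.Set.contains subs s' then
          if PySem.Set.contains sufs s' then fragWalkB target subs sufs i fuel s' (k+1) (k+1-i)
          else fragWalkB target subs sufs i fuel s' (k+1) best
        else best
    else best

def fragLoopB (target : List Char) (subs sufs : PySem.Set (List Char)) : Nat → Int → Int → Int
  | 0, _, out => out
  | fuel+1, i, out =>
    if i < (target.length : Int) then
      let best := fragWalkB target subs sufs i (target.length + 1) [] i 0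
      if best = 0 then out   -- Python: 'out += 1; i += 0' repeats forever; outside Pre_
      else fragLoopB target subs sufs fuel (i + best) (out + 1)
    else out

def fragments_alt (song : List String) : Int :=
  match song with
  | [] => 0   -- Python: song[0] raises IndexError; outside Pre_
  | t :: ps =>
    let pieces := ps.map String.toList
    fragLoopB t.toList (fragSubs pieces) (fragSufs pieces) (t.toList.length + 1) 0 0

-- ===== PRECONDITION & SPEC =====
-- Pre_ excludes exactly the inputs on which A never returns: song = [] (IndexError on song[0]), a nonempty
-- target with pieces = [] (ValueError from max() of an empty sequence), and inputs where some target
-- position matches no piece suffix (A's while loop then repeats forever).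
def Pre_fragments (song : List String) : Prop :=
  song ≠ [] ∧
  ∀ i < (song.headD "").toList.length, ∃ x ∈ song.tail, ∃ j < x.toList.length + 1,
    1 ≤ j ∧ i + j ≤ (song.headD "").toList.length ∧
    x.toList.drop (x.toList.length - j) = ((song.headD "").toList.drop i).take j
instance (song : List String) : Decidable (Pre_fragments song) := by unfold Pre_fragments; infer_instance

def pvWitness_fragments : List String := ["ab", "a", "b"]

def Spec_fragments (song : List String) (out : Int) : Prop := out = fragments_alt song
instance (song : List String) (out : Int) : Decidable (Spec_fragments song out) := by unfold Spec_fragments; infer_instance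

-- ===== CLAIM (what is proved, stated in full; the proofs are below) =====
def Claim_equal_fragments : Prop := ∀ (song : List String), Dom_fragments song → Pre_fragments song → Spec_fragments song (fragments song)

-- ===== LEMMAS AND PROOFS =====

-- proof-side reference value: the greatest t ≤ bound with target[p:p+t] a piece suffix (0 if none)
def fragBest (target : List Char) (S : PySem.Set (List Char)) (i : Int) : Nat → Nat
  | 0 => 0
  | j+1 =>
    if PySem.Set.contains S (PySem.List.slice target (some i) (some (i + ((j:Int)+1)))) then j+1
    else fragBest target S i j

-- the suffix set as A's comprehension builds it, used as the reference set in the proofs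
def fragSuffixes (pieces : List (List Char)) : PySem.Set (List Char) :=
  PySem.Set.ofList (pieces.flatMap (fun x =>
    (PySem.List.pyRange 1 ((x.length : Int) + 1)).map (fun j => PySem.List.slice x (some (-j)) none)))

theorem mem_fragSuffixes (pieces : List (List Char)) (s : List Char) :
    s ∈ fragSuffixes pieces ↔ ∃ x ∈ pieces, ∃ j : Nat, 1 ≤ j ∧ j ≤ x.length ∧ s = x.drop (x.length - j) := by
  rw [fragSuffixes, PySem.Set.mem_ofList]
  simp only [List.mem_flatMap, List.mem_map, PySem.List.mem_pyRange_one]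
  constructor
  · rintro ⟨x, hx, jj, ⟨h1, h2⟩, rfl⟩
    refine ⟨x, hx, jj.toNat, by omega, by omega, ?_⟩
    rw [show jj = ((jj.toNat : Nat) : Int) by omega, PySem.List.slice_from_neg_natCast x jj.toNat (by omega)]
    simp
    omega
  · rintro ⟨x, hx, j, h1, h2, rfl⟩
    exact ⟨x, hx, (j:Int), ⟨by exact_mod_cast h1, by exact_mod_cast Nat.lt_succ_of_le h2⟩,
      PySem.List.slice_from_neg_natCast x j (by omega)⟩

-- B's terminal set has the same members as the reference suffix set
theorem contains_fragSufs (pieces : List (List Char)) (s : List Char) :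
    PySem.Set.contains (fragSufs pieces) s = PySem.Set.contains (fragSuffixes pieces) s := by
  rw [Bool.eq_iff_iff, PySem.Set.contains_iff, PySem.Set.contains_iff, mem_fragSuffixes,
    fragSufs, PySem.Set.mem_ofList]
  simp only [List.mem_flatMap, List.mem_map, PySem.List.mem_pyRange_one]
  constructor
  · rintro ⟨x, hx, a, ⟨h0, ha⟩, rfl⟩
    refine ⟨x, hx, x.length - a.toNat, by omega, by omega, ?_⟩
    rw [show x.length - (x.length - a.toNat) = a.toNat by omega,
      show a = ((a.toNat : Nat) : Int) by omega, PySem.List.slice_from_natCast]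
    simp
    omega
  · rintro ⟨x, hx, j, h1, h2, rfl⟩
    exact ⟨x, hx, ((x.length - j : Nat) : Int), ⟨by omega, by push_cast; omega⟩,
      PySem.List.slice_from_natCast x _⟩

theorem mem_fragSubs (pieces : List (List Char)) (s : List Char) :
    s ∈ fragSubs pieces ↔ ∃ x ∈ pieces, ∃ a b : Nat, a < b ∧ b ≤ x.length ∧ s = (x.drop a).take (b - a) := by
  rw [fragSubs, PySem.Set.mem_ofList]
  simp only [List.mem_flatMap, List.mem_map, PySem.List.mem_pyRange_one]
  constructor
  · rintro ⟨x, hx, a, ⟨ha0, ha⟩, b, ⟨hb1, hb2⟩, rfl⟩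
    refine ⟨x, hx, a.toNat, b.toNat, by omega, by omega, ?_⟩
    rw [show a = ((a.toNat : Nat) : Int) by omega, show b = ((b.toNat : Nat) : Int) by omega,
      PySem.List.slice_natCast]
    simp
    congr 1
    · omega
    · congr 1
      omega
  · rintro ⟨x, hx, a, b, hab, hb, rfl⟩
    exact ⟨x, hx, (a:Int), ⟨by omega, by exact_mod_cast Nat.lt_of_lt_of_le hab hb⟩,
      (b:Int), ⟨by exact_mod_cast hab, by push_cast; omega⟩, PySem.List.slice_natCast x a b⟩

-- A's break condition at length j is suffix-set membership of the slice
theorem frag_cond_iff (target : List Char) (pieces : List (List Char)) (k j : Nat)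
    (hj1 : 1 ≤ j) (hjn : k + j ≤ target.length) :
    ((pieces.filter (fun x => decide (j ≤ x.length))).map
        (fun x => PySem.List.slice x (some (-(j:Int))) none)).any
      (fun x => PySem.List.slice target (some (k:Int)) (some ((k:Int) + (j:Int))) == x) =
    PySem.Set.contains (fragSuffixes pieces)
      (PySem.List.slice target (some (k:Int)) (some ((k:Int) + (j:Int)))) := by
  have hs : PySem.List.slice target (some (k:Int)) (some ((k:Int) + (j:Int)))
      = (target.drop k).take j := PySem.List.slice_natCast_add target k j
  have hslen : ((target.drop k).take j).length = j := by
    simp [List.length_take, List.length_drop]; omega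
  rw [Bool.eq_iff_iff, PySem.Set.contains_iff, mem_fragSuffixes, hs]
  simp only [List.any_eq_true, List.mem_map, List.mem_filter, decide_eq_true_eq, beq_iff_eq]
  constructor
  · rintro ⟨s, ⟨x, ⟨hx, hlen⟩, rfl⟩, heq⟩
    rw [PySem.List.slice_from_neg_natCast x j (by omega)] at heq
    exact ⟨x, hx, j, hj1, hlen, heq⟩
  · rintro ⟨x, hx, jj, hjj1, hjj2, heq⟩
    have hlen2 : (x.drop (x.length - jj)).length = jj := by
      simp [List.length_drop]; omega
    have : jj = j := by rw [← heq] at hlen2; omega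
    subst this
    exact ⟨x.drop (x.length - jj), ⟨x, ⟨hx, hjj2⟩,
      PySem.List.slice_from_neg_natCast x jj (by omega)⟩, heq⟩

-- for j beyond the remaining target length A's condition is false (the slice is too short)
theorem fragScanA_drop_high (target : List Char) (pieces : List (List Char)) (k : Nat) (hk : k ≤ target.length) :
    ∀ j, fragScanA target pieces (k:Int) j = fragScanA target pieces (k:Int) (min j (target.length - k)) := by
  intro j
  induction j with
  | zero => simp
  | succ j ih =>
    by_cases hle : j + 1 ≤ target.length - k
    · rw [Nat.min_eq_left hle]
    · have hcond : ((pieces.filter (fun x => decide (j+1 ≤ x.length))).map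
          (fun x => PySem.List.slice x (some (-((j:Int)+1))) none)).any
          (fun x => PySem.List.slice target (some (k:Int)) (some ((k:Int) + ((j:Int)+1))) == x) = false := by
        rw [List.any_eq_false]
        intro s hs'
        rw [List.mem_map] at hs'
        obtain ⟨x, hx, rfl⟩ := hs'
        rw [List.mem_filter, decide_eq_true_eq] at hx
        intro hbeq
        rw [beq_iff_eq] at hbeq
        have h1 : (PySem.List.slice target (some (k:Int)) (some ((k:Int) + ((j:Int)+1)))).length
            = target.length - k := by
          rw [show ((k:Int) + ((j:Int)+1)) = (((k+j+1 : Nat)) : Int) by push_cast; ring,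
            PySem.List.slice_natCast]
          simp [List.length_take, List.length_drop]; omega
        have h2 : (PySem.List.slice x (some (-((j:Int)+1))) none).length = j + 1 := by
          rw [show (-((j:Int)+1)) = -(((j+1 : Nat)) : Int) by push_cast; ring,
            PySem.List.slice_from_neg_natCast x (j+1) (by omega)]
          simp [List.length_drop]; omega
        rw [hbeq, h2] at h1
        omega
      rw [show min (j+1) (target.length - k) = min j (target.length - k) by omega, ← ih]
      simp only [fragScanA, hcond]
      simp

-- A's descending scan is the reference value, within the remaining target length
theorem fragScan_eq_low (target : List Char) (pieces : List (List Char)) (k : Nat) :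
    ∀ j, k + j ≤ target.length →
      fragScanA target pieces (k:Int) j =
        (if fragBest target (fragSuffixes pieces) (k:Int) j = 0 then none
         else some (fragBest target (fragSuffixes pieces) (k:Int) j)) := by
  intro j
  induction j with
  | zero => intro _; simp [fragScanA, fragBest]
  | succ j ih =>
    intro hle
    have hc := frag_cond_iff target pieces k (j+1) (by omega) (by omega)
    simp only [fragScanA, fragBest]
    push_cast at hc ⊢
    rw [hc]
    by_cases hcond : PySem.Set.contains (fragSuffixes pieces)
        (PySem.List.slice target (some (k:Int)) (some ((k:Int) + ((j:Int)+1)))) = true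
    · have hmem := (PySem.Set.contains_iff _ _).mp hcond
      simp [hmem]
    · rw [if_neg hcond, if_neg hcond]
      exact ih (by omega)

-- fragBest is unchanged by lengths at which the suffix condition is false
theorem fragBest_stationary (target : List Char) (S : PySem.Set (List Char)) (k d : Nat) :
    ∀ D, d ≤ D →
      (∀ t, d < t → t ≤ D →
        PySem.Set.contains S (PySem.List.slice target (some (k:Int)) (some ((k:Int) + (t:Int)))) = false) →
      fragBest target S (k:Int) D = fragBest target S (k:Int) d := by
  intro D
  induction D with
  | zero =>
    intro h _
    have hd0 : d = 0 := by omega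
    rw [hd0]
  | succ D ih =>
    intro hdD hfalse
    by_cases hd : d = D + 1
    · rw [hd]
    · have hc := hfalse (D+1) (by omega) (by omega)
      simp only [fragBest]
      push_cast at hc ⊢
      rw [hc, if_neg (by simp)]
      exact ih (by omega) (fun t h1 h2 => hfalse t h1 (by omega))

-- halted walk: if target[p:p+d+1] is not a trie node then no length t > d matches
theorem frag_no_long (target : List Char) (pieces : List (List Char)) (p d : Nat)
    (hsub : PySem.Set.contains (fragSubs pieces) ((target.drop p).take (d+1)) = false) :
    ∀ t, d < t → p + t ≤ target.length →
      PySem.Set.contains (fragSuffixes pieces)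
        (PySem.List.slice target (some (p:Int)) (some ((p:Int) + (t:Int)))) = false := by
  intro t hdt hpt
  rw [PySem.List.slice_natCast_add]
  by_contra hcon
  rw [Bool.not_eq_false, PySem.Set.contains_iff, mem_fragSuffixes] at hcon
  obtain ⟨x, hx, j, hj1, hj2, heq⟩ := hcon
  have hlen : ((target.drop p).take t).length = t := by
    simp [List.length_take, List.length_drop]; omega
  have hlen2 : (x.drop (x.length - j)).length = j := by simp [List.length_drop]; omega
  have hjt : j = t := by rw [heq] at hlen; omega
  subst hjt
  have hmem : (target.drop p).take (d+1) ∈ fragSubs pieces := by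
    rw [mem_fragSubs]
    refine ⟨x, hx, x.length - j, x.length - j + (d+1), by omega, by omega, ?_⟩
    rw [show x.length - j + (d+1) - (x.length - j) = d + 1 by omega, ← heq, List.take_take,
      Nat.min_eq_left (by omega)]
  have hc := (PySem.Set.contains_iff (fragSubs pieces) ((target.drop p).take (d+1))).mpr hmem
  rw [hc] at hsub
  exact Bool.noConfusion hsub

-- the forward trie walk computes the reference value over the whole remaining target
theorem fragWalk_spec (target : List Char) (pieces : List (List Char)) (p : Nat)
    (hp : p ≤ target.length) :
    ∀ fuel d, p + d ≤ target.length → target.length ≤ fuel + (p + d) →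
      fragWalkB target (fragSubs pieces) (fragSufs pieces) (p:Int) fuel
        ((target.drop p).take d) (((p + d : Nat) : Int))
        ((fragBest target (fragSuffixes pieces) (p:Int) d : Nat) : Int)
      = ((fragBest target (fragSuffixes pieces) (p:Int) (target.length - p) : Nat) : Int) := by
  intro fuel
  induction fuel with
  | zero =>
    intro d h1 h2
    have hd : d = target.length - p := by omega
    simp [fragWalkB, hd]
  | succ fuel ih =>
    intro d h1 h2
    by_cases hk : p + d < target.length
    · have hget : PySem.List.pyGet? target (((p + d : Nat) : Int)) = some target[p+d] := by
        rw [PySem.List.pyGet?_natCast]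
        exact List.getElem?_eq_getElem hk
      have hs' : (target.drop p).take d ++ [target[p+d]] = (target.drop p).take (d+1) := by
        rw [List.take_succ]
        congr 1
        rw [List.getElem?_drop]
        simp [List.getElem?_eq_getElem hk]
      have hslice : PySem.List.slice target (some (p:Int)) (some ((p:Int) + ((d:Int)+1)))
          = (target.drop p).take (d+1) := by
        rw [show (p:Int) + ((d:Int)+1) = (p:Int) + ((d+1 : Nat) : Int) by push_cast; ring]
        exact PySem.List.slice_natCast_add target p (d+1)
      have hklt : ((p + d : Nat) : Int) < ((target.length : Nat) : Int) := by exact_mod_cast hk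
      simp only [fragWalkB, hget, hs']
      rw [if_pos hklt]
      by_cases hsub : PySem.Set.contains (fragSubs pieces) ((target.drop p).take (d+1)) = true
      · rw [if_pos hsub, contains_fragSufs]
        by_cases hsuf : PySem.Set.contains (fragSuffixes pieces) ((target.drop p).take (d+1)) = true
        · rw [if_pos hsuf]
          have hbest : fragBest target (fragSuffixes pieces) (p:Int) (d+1) = d+1 := by
            simp only [fragBest]
            push_cast
            rw [hslice, if_pos hsuf]
          have hrw : ((p + d : Nat) : Int) + 1 - (p:Int) = ((fragBest target (fragSuffixes pieces) (p:Int) (d+1) : Nat) : Int) := by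
            rw [hbest]; push_cast; ring
          have hk' : ((p + d : Nat) : Int) + 1 = ((p + (d+1) : Nat) : Int) := by push_cast; ring
          rw [hrw, hk']
          exact ih (d+1) (by omega) (by omega)
        · rw [if_neg hsuf]
          have hbest : fragBest target (fragSuffixes pieces) (p:Int) (d+1)
              = fragBest target (fragSuffixes pieces) (p:Int) d := by
            simp only [fragBest]
            push_cast
            rw [hslice, if_neg hsuf]
          have hk' : ((p + d : Nat) : Int) + 1 = ((p + (d+1) : Nat) : Int) := by push_cast; ring
          rw [hk', ← hbest]
          exact ih (d+1) (by omega) (by omega)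
      · rw [if_neg hsub]
        congr 1
        rw [fragBest_stationary target (fragSuffixes pieces) p d (target.length - p) (by omega)]
        intro t h1' h2'
        exact frag_no_long target pieces p d (by simpa using hsub) t h1' (by omega)
    · have hd : d = target.length - p := by omega
      have hge : ¬ (((p + d : Nat) : Int) < ((target.length : Nat) : Int)) := by exact_mod_cast hk
      simp only [fragWalkB]
      rw [if_neg hge, hd]

-- every matching length is at most the longest piece length
theorem fragBest_min (target : List Char) (pieces : List (List Char)) (p : Nat) (m : Int)
    (hm : PySem.List.max? (pieces.map (fun x => (x.length : Int))) (fun v => v) = some m)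
    (hp : p ≤ target.length) :
    fragBest target (fragSuffixes pieces) (p:Int) (target.length - p)
      = fragBest target (fragSuffixes pieces) (p:Int) (min m.toNat (target.length - p)) := by
  by_cases hle : target.length - p ≤ m.toNat
  · rw [Nat.min_eq_right hle]
  · rw [fragBest_stationary target (fragSuffixes pieces) p (min m.toNat (target.length - p))
      (target.length - p) (by omega)]
    intro t h1 h2
    by_contra hcon
    rw [Bool.not_eq_false, PySem.List.slice_natCast_add, PySem.Set.contains_iff, mem_fragSuffixes] at hcon
    obtain ⟨x, hx, j, hj1, hj2, heq⟩ := hcon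
    have hxm : (x.length : Int) ≤ m := PySem.List.max?_isMax hm _ (List.mem_map_of_mem hx)
    have hlen : ((target.drop p).take t).length = t := by
      simp [List.length_take, List.length_drop]; omega
    have hlen2 : (x.drop (x.length - j)).length = j := by simp [List.length_drop]; omega
    have : j = t := by rw [heq] at hlen; omega
    omega

theorem fragBest_le (target : List Char) (S : PySem.Set (List Char)) (i : Int) :
    ∀ j, fragBest target S i j ≤ j := by
  intro j
  induction j with
  | zero => simp [fragBest]
  | succ j ih =>
    simp only [fragBest]
    split
    · omega
    · omega

theorem frag_max?_isSome : ∀ (l : List Int) (x : Int),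
    ∃ m, PySem.List.max? (x :: l) (fun v => v) = some m := by
  intro l
  induction l with
  | nil => intro x; exact ⟨x, rfl⟩
  | cons y l ih =>
    intro x
    have hstep : PySem.List.max? (x :: y :: l) (fun v => v)
        = PySem.List.max? ((if x < y then y else x) :: l) (fun v => v) := by
      simp only [PySem.List.max?, List.foldl_cons]
      by_cases h : x < y <;> simp [h]
    rw [hstep]; exact ih _

theorem fragLoop_eq (target : List Char) (p : List Char) (ps : List (List Char)) :
    ∀ fuel (k : Nat) (out : Int), k ≤ target.length →
      fragLoopA target (p :: ps) fuel (k:Int) out =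
      fragLoopB target (fragSubs (p :: ps)) (fragSufs (p :: ps)) fuel (k:Int) out := by
  intro fuel
  induction fuel with
  | zero => intro k out _; rfl
  | succ fuel ih =>
    intro k out hkle
    by_cases hk : (k:Int) < (target.length : Int)
    · have hkn : k < target.length := by exact_mod_cast hk
      obtain ⟨m, hm⟩ := frag_max?_isSome (ps.map (fun x => (x.length : Int))) ((p.length : Int))
      have hm' : PySem.List.max? ((p :: ps).map (fun x => (x.length : Int))) (fun v => v) = some m := hm
      have hscan : fragScanA target (p :: ps) (k:Int) m.toNat =
          (if fragBest target (fragSuffixes (p :: ps)) (k:Int) (target.length - k) = 0 then none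
           else some (fragBest target (fragSuffixes (p :: ps)) (k:Int) (target.length - k))) := by
        rw [fragScanA_drop_high target (p :: ps) k (by omega) m.toNat,
          fragScan_eq_low target (p :: ps) k _ (by omega),
          ← fragBest_min target (p :: ps) k m hm' (by omega)]
      have hwalk : fragWalkB target (fragSubs (p :: ps)) (fragSufs (p :: ps)) (k:Int)
          (target.length + 1) [] (k:Int) 0
          = ((fragBest target (fragSuffixes (p :: ps)) (k:Int) (target.length - k) : Nat) : Int) := by
        have h0 := fragWalk_spec target (p :: ps) k (by omega) (target.length + 1) 0 (by omega) (by omega)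
        simpa [fragBest] using h0
      simp only [fragLoopA, fragLoopB, if_pos hk, hm', hscan, hwalk]
      set b := fragBest target (fragSuffixes (p :: ps)) (k:Int) (target.length - k) with hb
      by_cases h0 : b = 0
      · simp [h0]
      · have hbne : ¬ ((b : Int) = 0) := by exact_mod_cast h0
        rw [if_neg h0]
        simp only [h0, if_false, hbne, if_neg hbne]
        rw [show (k:Int) + ((b : Nat) : Int) = (((k + b : Nat)) : Int) by push_cast; ring]
        have hble : b ≤ target.length - k := fragBest_le target _ _ _
        exact ih (k + b) (out + 1) (by omega)
    · simp only [fragLoopA, fragLoopB, if_neg hk]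

-- ===== VERDICT (by name: the statement is the Claim_ definition above) =====
theorem fragments_spec : Claim_equal_fragments := by
  intro song _ hpre
  unfold Spec_fragments
  obtain ⟨hne, hcov⟩ := hpre
  match song, hne with
  | t :: ps, _ =>
    simp only [List.headD_cons, List.tail_cons] at hcov
    cases ps with
    | nil =>
      have hlen : t.toList.length = 0 := by
        by_contra h
        obtain ⟨x, hx, _⟩ := hcov 0 (by omega)
        simp at hx
      have ht : t.toList = [] := List.length_eq_zero_iff.mp hlen
      simp [fragments, fragments_alt, ht, fragLoopA, fragLoopB]
    | cons p ps' =>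
      have h := fragLoop_eq t.toList p.toList (ps'.map String.toList) (t.toList.length + 1) 0 0 (by omega)
      simp only [fragments, fragments_alt, List.map_cons]
      exact_mod_cast h
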